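-- pv_equiv track=rewrite | github.com/Neihtq/perspective-dialogue-summarization | Multi-View-Seq2Seq/utils/helper.py | remove_name
-- ===== SOURCE A (Python) =====
-- def remove_name(string):
--     tmp, flag = "", 0
--     for c in string:
--         if c == ':':
--             flag = 1
--             continue
--         if flag:
--             tmp += c
--
--     return tmp
-- ===== SOURCE B (Python) =====
-- def remove_name(string):
--     idx = string.find(':')
--     if idx == -1:
--         return ""
--     return string[idx + 1:].replace(':', '')
-- ===== Notes on version B (the rewrite author's own statement) =====
-- stated objective: idiomatic
-- what changed: Replaces A's per-character flag state machine with a locate-then-transform pipeline: find the first colon, slice past it, and delete remaining colons with str.replace.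
import Mathlib
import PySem

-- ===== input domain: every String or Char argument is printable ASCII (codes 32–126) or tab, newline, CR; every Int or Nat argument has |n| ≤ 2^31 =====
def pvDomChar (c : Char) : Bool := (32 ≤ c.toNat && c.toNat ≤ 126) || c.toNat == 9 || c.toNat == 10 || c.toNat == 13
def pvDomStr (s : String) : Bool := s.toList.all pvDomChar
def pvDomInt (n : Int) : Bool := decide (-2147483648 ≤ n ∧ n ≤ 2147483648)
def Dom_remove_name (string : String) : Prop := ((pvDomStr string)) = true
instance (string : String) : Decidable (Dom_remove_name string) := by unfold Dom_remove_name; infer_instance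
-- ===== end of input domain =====

-- B replaces A's per-character flag loop with a find/slice/replace pipeline (idiomatic).


-- ===== PORT A =====
-- for c in string: if c == ':': flag = 1; continue; if flag: tmp += c
def stepA (st : List Char × Int) (c : Char) : List Char × Int :=
  if c = ':' then (st.1, 1)
  else if st.2 ≠ 0 then (st.1 ++ [c], st.2)
  else st

def remove_name (string : String) : String :=
  let st := string.toList.foldl stepA ([], 0)
  String.ofList st.1

-- ===== PORT B =====
def remove_name_alt (string : String) : String :=
  let idx := PySem.Str.find string ":"
  if idx = -1 then ""
  else PySem.Str.replace (PySem.Str.slice string (some (idx + 1)) none) ":" ""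

-- ===== PRECONDITION & SPEC =====
def Spec_remove_name (string : String) (out : String) : Prop := out = remove_name_alt string
instance (string : String) (out : String) : Decidable (Spec_remove_name string out) := by unfold Spec_remove_name; infer_instance

-- ===== CLAIM (what is proved, stated in full; the proofs are below) =====
def Claim_equal_remove_name : Prop := ∀ (string : String), Dom_remove_name string → Spec_remove_name string (remove_name string)

-- ===== LEMMAS AND PROOFS =====

-- A's loop once the flag is set: appends every non-colon character.
theorem foldA_flag_one (l : List Char) (acc : List Char) :
    l.foldl stepA (acc, 1) = (acc ++ l.filter (fun c => c ≠ ':'), 1) := by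
  induction l generalizing acc with
  | nil => simp
  | cons c t ih =>
    rw [List.foldl_cons]
    by_cases hc : c = ':'
    · rw [show stepA (acc, 1) c = (acc, 1) by simp [stepA, hc]]
      rw [ih]
      simp [hc]
    · rw [show stepA (acc, 1) c = (acc ++ [c], 1) by simp [stepA, hc]]
      rw [ih]
      simp [hc]

theorem foldA_flag_zero (l : List Char) (acc : List Char) :
    (l.foldl stepA (acc, 0)).1
    = acc ++ (l.dropWhile (fun c => c ≠ ':')).filter (fun c => c ≠ ':') := by
  induction l generalizing acc with
  | nil => simp
  | cons c t ih =>
    rw [List.foldl_cons]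
    by_cases hc : c = ':'
    · rw [show stepA (acc, 0) c = (acc, 1) by simp [stepA, hc]]
      rw [foldA_flag_one]
      simp [hc]
    · rw [show stepA (acc, 0) c = (acc, 0) by simp [stepA, hc]]
      rw [ih]
      simp [hc]

-- dropWhile (≠ ':') reaches exactly the first colon position.
theorem dropWhile_eq_drop_of_first (s : List Char) (n : Nat)
    (hmem : (s.drop n).head? = some ':')
    (hmin : ∀ i, i < n → (s.drop i).head? ≠ some ':') :
    s.dropWhile (fun c => c ≠ ':') = s.drop n := by
  induction s generalizing n with
  | nil => simp at hmem
  | cons c t ih =>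
    cases n with
    | zero =>
      simp only [List.drop_zero, List.head?_cons, Option.some.injEq] at hmem
      simp [hmem]
    | succ m =>
      have hc : c ≠ ':' := by
        have := hmin 0 (Nat.succ_pos m)
        simpa using this
      simp only [List.drop_succ_cons] at hmem ⊢
      rw [List.dropWhile_cons, if_pos (by simp [hc])]
      exact ih m hmem (fun i hi => by
        have := hmin (i + 1) (by omega)
        simpa using this)
  
-- replace with a single-char pattern and empty replacement is filter.
theorem replace_go_filter (fuel : Nat) (l acc : List Char)
    (h : l.length ≤ fuel) :
    PySem.Chars.replace.go [':'] [] fuel l acc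
      = acc.reverse ++ l.filter (fun c => c ≠ ':') := by
  induction fuel generalizing l acc with
  | zero =>
    have : l = [] := by
      cases l with
      | nil => rfl
      | cons a t => simp at h
    subst this
    simp [PySem.Chars.replace.go]
  | succ f ih =>
    cases l with
    | nil => simp [PySem.Chars.replace.go]
    | cons c t =>
      by_cases hc : c = ':'
      · subst hc
        have : [':'].isPrefixOf (':' :: t) = true := by simp [List.isPrefixOf]
        simp only [PySem.Chars.replace.go, this, if_pos, List.length_cons,
          List.length_nil, List.drop_succ_cons, List.drop_zero, List.reverse_nil,
          List.nil_append]
        rw [ih t acc (by simpa using Nat.le_of_succ_le_succ h)]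
        simp
      · have hpre : [':'].isPrefixOf (c :: t) = false := by
          simp only [List.isPrefixOf, Bool.and_eq_false_iff, beq_eq_false_iff_ne]
          exact Or.inl (fun e => hc e.symm)
        simp only [PySem.Chars.replace.go, hpre]
        rw [if_neg (by simp)]
        rw [ih t (c :: acc) (by simpa using Nat.le_of_succ_le_succ h)]
        simp [hc]

theorem replace_colon_filter (l : List Char) :
    PySem.Chars.replace l [':'] [] = l.filter (fun c => c ≠ ':') := by
  rw [show PySem.Chars.replace l [':'] [] = PySem.Chars.replace.go [':'] [] l.length l [] from by
    simp [PySem.Chars.replace]]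
  rw [replace_go_filter l.length l [] (le_refl _)]
  simp

-- ===== VERDICT (by name: the statement is the Claim_ definition above) =====
-- [a] is a prefix exactly when it is the head.
theorem singleton_prefix_iff_head? (a : Char) (l : List Char) :
    [a] <+: l ↔ l.head? = some a := by
  cases l with
  | nil => simp
  | cons c t =>
    constructor
    · rintro ⟨r, hr⟩
      simp only [List.cons_append, List.nil_append, List.cons.injEq] at hr
      simp [hr.1]
    · intro h
      simp only [List.head?_cons, Option.some.injEq] at h
      exact ⟨t, by simp [h]⟩

theorem remove_name_spec : Claim_equal_remove_name := by
  intro s _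
  unfold Spec_remove_name remove_name remove_name_alt
  simp only []
  rw [foldA_flag_zero]
  simp only [List.nil_append]
  by_cases hfind : PySem.Str.find s ":" = -1
  · rw [if_pos hfind]
    have hni : ¬ ((":".toList) <:+: s.toList) := by
      rw [← PySem.Str.find_eq_neg_one_iff]
      exact hfind
    have hmem : (':' : Char) ∉ s.toList := by
      intro hm
      exact hni (by
        obtain ⟨l1, l2, h12⟩ := List.append_of_mem hm
        exact ⟨l1, l2, by simp [h12]⟩)
    have hdw : s.toList.dropWhile (fun c => c ≠ ':') = [] := by
      rw [List.dropWhile_eq_nil_iff]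
      intro x hx
      simp only [ne_eq, decide_not, Bool.not_true, Bool.not_eq_eq_eq_not, decide_eq_false_iff_not]
      exact fun he => hmem (he ▸ hx)
    rw [hdw]
    rfl
  · rw [if_neg hfind]
    have hfc : PySem.Str.find s ":" = PySem.Chars.find s.toList [':'] := by
      simp [PySem.Str.find]
    set idx := PySem.Chars.find s.toList [':'] with hidx
    rw [hfc] at hfind
    have h0 : 0 ≤ idx := by
      have := PySem.Chars.neg_one_le_find s.toList [':']
      rw [← hidx] at this
      omega
    obtain ⟨hpre, hmin⟩ := PySem.Chars.find_spec (s := s.toList) (sub := [':']) (by rw [← hidx]; exact h0)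
    rw [← hidx] at hpre hmin
    set n := idx.toNat with hn
    have hmem : (s.toList.drop n).head? = some ':' := (singleton_prefix_iff_head? _ _).mp hpre
    have hlt : n < s.toList.length := by
      by_contra hge
      rw [List.drop_eq_nil_of_le (by omega)] at hmem
      simp at hmem
    have hdw : s.toList.dropWhile (fun c => c ≠ ':') = s.toList.drop n := by
      apply dropWhile_eq_drop_of_first
      · exact hmem
      · intro i hi hh
        exact hmin i hi ((singleton_prefix_iff_head? _ _).mpr hh)
    rw [hdw]
    have hdropn : s.toList.drop n = ':' :: s.toList.drop (n + 1) := by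
      rw [List.drop_eq_getElem_cons hlt]
      congr 1
      rw [List.head?_drop] at hmem
      simpa [List.getElem?_eq_getElem hlt] using hmem
    rw [hdropn]
    rw [show PySem.Str.replace (PySem.Str.slice s (some (PySem.Str.find s ":" + 1)) none) ":" ""
        = String.ofList (PySem.Chars.replace
            (PySem.Str.slice s (some (PySem.Str.find s ":" + 1)) none).toList [':'] []) from rfl]
    rw [replace_colon_filter]
    have hslice : (PySem.Str.slice s (some (PySem.Str.find s ":" + 1)) none).toList
        = s.toList.drop (n + 1) := by
      rw [PySem.Str.toList_slice]
      rw [PySem.Chars.slice_eq_listSlice, hfc]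
      rw [PySem.List.slice_from (a := idx + 1) s.toList (by omega)]
      congr 1
      omega
    rw [hslice]
    simp
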